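-- pv_equiv track=rewrite | github.com/dpolyak/opsschool3-coding | exercise1.py | devide_people_by_buckets
-- ===== SOURCE A (Python) =====
-- DEBUG_MODE = False
--
-- def create_buckets_groups_list(buckets):
-- 	all_age_groups = []
--
-- 	buckets.sort()
-- 	buckets_length = len(buckets)
--
-- 	if buckets_length >= 2:
-- 		for i in range(0, buckets_length - 1):
-- 			age_group = (buckets[i], buckets[i + 1])
-- 			all_age_groups.append(age_group)
--
-- 	return all_age_groups
--
-- def devide_people_by_buckets(people, buckets):
-- 	youngest_bucket = []
-- 	oldest_bucket = []
--
-- 	buckets_list = create_buckets_groups_list(buckets)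
--
-- 	min_bucket_age = buckets_list[0][0]
-- 	max_bucket_age = buckets_list[-1][-1]
-- 	people_min_age = min_bucket_age
-- 	people_max_age = max_bucket_age
-- 	people_by_group_list = list()
--
-- 	#init list of people devided by age buckets
-- 	for i in buckets_list:
-- 		people_by_group_list.append( list() )
--
-- 	# devide people by buckets
-- 	for name, age in people.items():
-- 		group_id = 0
-- 		found_bucket = False
--
-- 		for age_group in buckets_list:
-- 			if age in range(age_group[0], age_group[1]):
-- 				if not DEBUG_MODE:
-- 					people_by_group_list[group_id].append(name)
-- 				else:
-- 					people_by_group_list[group_id].append(age)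
-- 				found_bucket = True
-- 			group_id += 1
--
-- 		# update oldest and youngest extra buckets
-- 		if not found_bucket:
-- 			if age > max_bucket_age:
-- 				update_bucket(oldest_bucket, name, age)
-- 				if age > people_max_age:
-- 					people_max_age = age
-- 			elif age < min_bucket_age:
-- 				update_bucket(youngest_bucket, name, age)
-- 				if age < people_min_age:
-- 					people_min_age = age
--
-- 	# add oldest and youngest extra buckets
-- 	if people_min_age < min_bucket_age:
-- 		buckets_list.insert( 0, (people_min_age, min_bucket_age) )
-- 		people_by_group_list.insert(0, youngest_bucket)
-- 	if people_max_age > max_bucket_age: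
-- 		buckets_list.append((max_bucket_age, people_max_age))
-- 		people_by_group_list.append(oldest_bucket)
--
--
-- 	return (buckets_list, people_by_group_list)
--
-- def update_bucket(bucket, name, age):
-- 	if not DEBUG_MODE:
-- 		bucket.append(name)
-- 	else:
-- 		bucket.append(age)
-- ===== SOURCE B (Python) =====
-- # B: sort once, then O(log B) bisect per person instead of A's linear scan over all buckets.
-- # Note: A sorts the caller's `buckets` list in place; B does not mutate its arguments
-- # (the equivalence claimed is about the return value only).
-- import bisect
--
-- def devide_people_by_buckets(people, buckets):
--     sb = sorted(buckets)
--     pairs = list(zip(sb, sb[1:]))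
--     min_b = sb[0]
--     max_b = sb[-1]
--     n = len(sb)
--     groups = [[] for _ in pairs]
--     youngest = []
--     oldest = []
--     pmin = min_b
--     pmax = max_b
--     for name, age in people.items():
--         j = bisect.bisect_right(sb, age)
--         if j == 0:
--             youngest.append(name)
--             pmin = min(pmin, age)
--         elif j == n:
--             if age > max_b:
--                 oldest.append(name)
--                 pmax = max(pmax, age)
--         else:
--             groups[j - 1].append(name)
--     if pmin < min_b:
--         pairs.insert(0, (pmin, min_b))
--         groups.insert(0, youngest)
--     if pmax > max_b:
--         pairs.append((max_b, pmax))
--         groups.append(oldest)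
--     return (pairs, groups)
-- ===== Notes on version B (the rewrite author's own statement) =====
-- stated objective: faster
-- what changed: Per person, A linearly scans every bucket pair with a running group index; B sorts the boundaries once and locates each person's bucket with one bisect_right binary search (buckets built by zip instead of an index loop).
import Mathlib
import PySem

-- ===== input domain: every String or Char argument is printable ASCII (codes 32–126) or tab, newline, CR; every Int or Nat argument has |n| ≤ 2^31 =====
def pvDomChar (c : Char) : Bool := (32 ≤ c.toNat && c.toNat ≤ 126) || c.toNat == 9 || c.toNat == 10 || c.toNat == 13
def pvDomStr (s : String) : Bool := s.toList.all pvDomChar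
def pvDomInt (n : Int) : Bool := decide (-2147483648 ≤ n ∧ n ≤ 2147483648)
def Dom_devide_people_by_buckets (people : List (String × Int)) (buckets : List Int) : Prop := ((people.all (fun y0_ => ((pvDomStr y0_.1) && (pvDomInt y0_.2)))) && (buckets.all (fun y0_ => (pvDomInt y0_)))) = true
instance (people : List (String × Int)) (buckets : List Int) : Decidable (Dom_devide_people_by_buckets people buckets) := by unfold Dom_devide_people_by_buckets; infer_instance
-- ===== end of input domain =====

-- B replaces A's per-person linear scan over all bucket pairs by one bisect_right binary
-- search on the sorted boundaries (objective: faster). A sorts the caller's `buckets` in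
-- place; B does not — the claim below is about the return value only.

-- ===== PORT A =====
-- the body of A's inner `for age_group in buckets_list` loop (group_id counter + found flag)
def pvStepA (name : String) (age : Int) (q : List (List String) × Nat × Bool) (ag : Int × Int) :
    List (List String) × Nat × Bool :=
  if ag.1 ≤ age ∧ age < ag.2 then (q.1.modify q.2.1 (· ++ [name]), q.2.1 + 1, true)
  else (q.1, q.2.1 + 1, q.2.2)

def pvCreateBucketsGroupsList (buckets : List Int) : List (Int × Int) :=
  let sb := PySem.List.sorted buckets (fun x => x)
  let bucketsLength : Int := sb.length
  if 2 ≤ bucketsLength then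
    (PySem.List.pyRange 0 (bucketsLength - 1) 1).foldl
      (fun acc i => acc ++ [(PySem.List.pyGetD sb i 0, PySem.List.pyGetD sb (i + 1) 0)]) []
  else []

-- the body of A's `for name, age in people.items()` loop
def pvPersonA (bucketsList : List (Int × Int)) (minB maxB : Int)
    (st : List (List String) × List String × List String × Int × Int) (p : String × Int) :
    List (List String) × List String × List String × Int × Int :=
  let (groups, young, old, pmin, pmax) := st
  let (name, age) := p
  let r := bucketsList.foldl (pvStepA name age) (groups, 0, false)
  let groups := r.1
  let found := r.2.2
  if found = false then
    if age > maxB then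
      (groups, young, old ++ [name], pmin, if age > pmax then age else pmax)
    else if age < minB then
      (groups, young ++ [name], old, if age < pmin then age else pmin, pmax)
    else (groups, young, old, pmin, pmax)
  else (groups, young, old, pmin, pmax)

def devide_people_by_buckets (people : List (String × Int)) (buckets : List Int) :
    (List (Int × Int)) × List (List String) :=
  let bucketsList := pvCreateBucketsGroupsList buckets
  let minB := (PySem.List.pyGetD bucketsList 0 (0, 0)).1
  let maxB := (PySem.List.pyGetD bucketsList (-1) (0, 0)).2
  let init : List (List String) × List String × List String × Int × Int :=
    (bucketsList.map (fun _ => []), [], [], minB, maxB)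
  let r := people.foldl (pvPersonA bucketsList minB maxB) init
  let (groups, young, old, pmin, pmax) := r
  let s1 := if pmin < minB then ((pmin, minB) :: bucketsList, young :: groups)
            else (bucketsList, groups)
  if pmax > maxB then (s1.1 ++ [(maxB, pmax)], s1.2 ++ [old]) else s1

-- ===== PORT B =====
-- the body of B's `for name, age in people.items()` loop (one bisect_right per person)
def pvPersonB (sb : List Int) (n : Nat) (maxB : Int)
    (st : List (List String) × List String × List String × Int × Int) (p : String × Int) :
    List (List String) × List String × List String × Int × Int :=
  let (groups, young, old, pmin, pmax) := st
  let (name, age) := p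
  let j := PySem.List.bisectRight sb age
  if j = 0 then (groups, young ++ [name], old, min pmin age, pmax)
  else if j = n then
    if age > maxB then (groups, young, old ++ [name], pmin, max pmax age)
    else (groups, young, old, pmin, pmax)
  else (groups.modify (j - 1) (· ++ [name]), young, old, pmin, pmax)

def devide_people_by_buckets_alt (people : List (String × Int)) (buckets : List Int) :
    (List (Int × Int)) × List (List String) :=
  let sb := PySem.List.sorted buckets (fun x => x)
  let pairs := sb.zip (sb.drop 1)
  let minB := PySem.List.pyGetD sb 0 0
  let maxB := PySem.List.pyGetD sb (-1) 0
  let n := sb.length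
  let init : List (List String) × List String × List String × Int × Int :=
    (pairs.map (fun _ => []), [], [], minB, maxB)
  let r := people.foldl (pvPersonB sb n maxB) init
  let (groups, young, old, pmin, pmax) := r
  let s1 := if pmin < minB then ((pmin, minB) :: pairs, young :: groups)
            else (pairs, groups)
  if pmax > maxB then (s1.1 ++ [(maxB, pmax)], s1.2 ++ [old]) else s1

-- ===== PRECONDITION & SPEC =====
-- Pre_ asks for at least two bucket boundaries (with fewer, A raises IndexError reading
-- buckets_list[0]) and pairwise-distinct person names (the association list stands for a
-- Python dict, whose keys are necessarily distinct).
def Pre_devide_people_by_buckets (people : List (String × Int)) (buckets : List Int) : Prop :=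
  2 ≤ buckets.length ∧ (people.map Prod.fst).Nodup
instance (people : List (String × Int)) (buckets : List Int) : Decidable (Pre_devide_people_by_buckets people buckets) := by unfold Pre_devide_people_by_buckets; infer_instance

def pvWitness_devide_people_by_buckets : (List (String × Int)) × List Int :=
  ([("a", 5)], [0, 10])

def Spec_devide_people_by_buckets (people : List (String × Int)) (buckets : List Int) (out : (List (Int × Int)) × List (List String)) : Prop := out = devide_people_by_buckets_alt people buckets
instance (people : List (String × Int)) (buckets : List Int) (out : (List (Int × Int)) × List (List String)) : Decidable (Spec_devide_people_by_buckets people buckets out) := by unfold Spec_devide_people_by_buckets; infer_instance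

-- ===== CLAIM (what is proved, stated in full; the proofs are below) =====
def Claim_equal_devide_people_by_buckets : Prop := ∀ (people : List (String × Int)) (buckets : List Int), Dom_devide_people_by_buckets people buckets → Pre_devide_people_by_buckets people buckets → Spec_devide_people_by_buckets people buckets (devide_people_by_buckets people buckets)

-- ===== LEMMAS AND PROOFS =====

-- A's index-loop over `range(len-1)` builds exactly zip(sb, sb[1:]).
theorem pvMapRange_eq_zip (sb : List Int) :
    (List.range (sb.length - 1)).map (fun k => (sb.getD k 0, sb.getD (k + 1) 0)) =
      sb.zip (sb.drop 1) := by
  apply List.ext_getElem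
  · simp [List.length_zip]
  · intro i h1 h2
    simp only [List.getElem_map, List.getElem_range, List.getElem_zip, List.getElem_drop]
    have hi : i < sb.length - 1 := by simpa using h1
    rw [List.getD_eq_getElem _ _ (by omega), List.getD_eq_getElem _ _ (by omega)]
    have h1i : 1 + i = i + 1 := by omega
    simp [h1i]

theorem pvCreate_eq_zip (buckets : List Int) :
    pvCreateBucketsGroupsList buckets =
      (PySem.List.sorted buckets (fun x => x)).zip
        ((PySem.List.sorted buckets (fun x => x)).drop 1) := by
  unfold pvCreateBucketsGroupsList
  set sb := PySem.List.sorted buckets (fun x => x) with hsb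
  by_cases h2 : 2 ≤ (sb.length : Int)
  · rw [if_pos h2, PySem.List.foldl_append_singleton_eq_map, List.nil_append]
    rw [PySem.List.pyRange_one, List.map_map]
    have hlen : ((sb.length : Int) - 1 - 0).toNat = sb.length - 1 := by omega
    rw [hlen, ← pvMapRange_eq_zip sb]
    apply List.map_congr_left
    intro k hk
    simp only [Function.comp_apply, zero_add]
    rw [PySem.List.pyGetD_natCast]
    have hcast : ((k : Int) + 1) = ((k + 1 : Nat) : Int) := by push_cast; ring
    rw [hcast, PySem.List.pyGetD_natCast]
  · rw [if_neg h2]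
    have hle : sb.length ≤ 1 := by omega
    match sb, hle with
    | [], _ => simp
    | [x], _ => simp

-- A's inner scan with group_id counter, characterised by the unique matching index t-1.
theorem pvScanA_aux (name : String) (age : Int) :
    ∀ (P : List (Int × Int)) (g : Nat) (G : List (List String)) (fnd : Bool) (t : Nat),
      (∀ i (hi : i < P.length), (P[i].1 ≤ age ∧ age < P[i].2) ↔ g + i + 1 = t) →
      P.foldl (pvStepA name age) (G, g, fnd) =
        (if g + 1 ≤ t ∧ t ≤ g + P.length then G.modify (t - 1) (· ++ [name]) else G,
         g + P.length,
         fnd || decide (g + 1 ≤ t ∧ t ≤ g + P.length)) := by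
  intro P
  induction P with
  | nil =>
    intro g G fnd t h
    have hc : ¬ (g + 1 ≤ t ∧ t ≤ g) := by omega
    simp [hc]
  | cons a P ih =>
    intro g G fnd t h
    have h0 : (a.1 ≤ age ∧ age < a.2) ↔ g + 0 + 1 = t := h 0 (by simp)
    have htail : ∀ i (hi : i < P.length),
        (P[i].1 ≤ age ∧ age < P[i].2) ↔ (g + 1) + i + 1 = t := by
      intro i hi
      have hh := h (i + 1) (by simp; omega)
      simp only [List.getElem_cons_succ] at hh
      exact hh.trans (by omega)
    simp only [List.foldl_cons]
    by_cases hm : a.1 ≤ age ∧ age < a.2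
    · have ht : g + 1 = t := by simpa using h0.mp hm
      rw [show pvStepA name age (G, g, fnd) a = (G.modify g (· ++ [name]), g + 1, true) from by
        simp [pvStepA, hm]]
      rw [ih (g + 1) (G.modify g (· ++ [name])) true t htail]
      have hc2 : ¬ (g + 1 + 1 ≤ t ∧ t ≤ g + 1 + P.length) := by omega
      have hc1 : g + 1 ≤ t ∧ t ≤ g + (a :: P).length := by simp; omega
      rw [if_neg hc2, if_pos hc1, decide_eq_true hc1, decide_eq_false hc2]
      have hg : t - 1 = g := by omega
      simp [hg, List.length_cons]
      omega
    · have ht : ¬ (g + 1 = t) := by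
        intro he; exact hm (h0.mpr (by omega))
      rw [show pvStepA name age (G, g, fnd) a = (G, g + 1, fnd) from by simp [pvStepA, hm]]
      rw [ih (g + 1) G fnd t htail]
      have hiff : (g + 1 + 1 ≤ t ∧ t ≤ g + 1 + P.length) ↔
          (g + 1 ≤ t ∧ t ≤ g + (a :: P).length) := by simp; omega
      by_cases hc : g + 1 + 1 ≤ t ∧ t ≤ g + 1 + P.length
      · rw [if_pos hc, if_pos (hiff.mp hc), decide_eq_true hc, decide_eq_true (hiff.mp hc)]
        simp [List.length_cons]
        omega
      · rw [if_neg hc, if_neg (fun hx => hc (hiff.mpr hx)), decide_eq_false hc,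
          decide_eq_false (fun hx => hc (hiff.mpr hx))]
        simp [List.length_cons]
        omega

-- On a sorted list, pair i of zip(sb, sb[1:]) matches age iff i + 1 = bisect_right(sb, age).
theorem pvMatch_iff (sb : List Int) (age : Int) (hs : sb.Pairwise (· ≤ ·)) :
    ∀ i (hi : i < (sb.zip (sb.drop 1)).length),
      ((sb.zip (sb.drop 1))[i].1 ≤ age ∧ age < (sb.zip (sb.drop 1))[i].2) ↔
        0 + i + 1 = PySem.List.bisectRight sb age := by
  intro i hi
  obtain ⟨hj1, hj2, hj3⟩ := PySem.List.bisectRight_spec sb age hs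
  set j := PySem.List.bisectRight sb age with hj
  have hil : i < sb.length - 1 := by simpa [List.length_zip] using hi
  have hi1 : i < sb.length := by omega
  have hi2 : i + 1 < sb.length := by omega
  rw [List.getElem_zip]
  simp only [List.getElem_drop]
  have h1i : sb[1 + i] = sb[i + 1] := by
    congr 1
    omega
  constructor
  · rintro ⟨ha, hb⟩
    rw [h1i] at hb
    by_contra hne
    rcases Nat.lt_or_ge i j with hlt | hge
    · have hlt1 : i + 1 < j := by omega
      exact absurd (hj2 (i + 1) hi2 hlt1) (by omega)
    · exact absurd (hj3 i hi1 hge) (by omega)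
  · intro he
    rw [h1i]
    exact ⟨hj2 i hi1 (by omega), hj3 (i + 1) hi2 (by omega)⟩

-- the per-person loop bodies agree
theorem pvPerson_eq (sb : List Int) (hs : sb.Pairwise (· ≤ ·)) (hn : 2 ≤ sb.length)
    (st : List (List String) × List String × List String × Int × Int) (p : String × Int) :
    pvPersonA (sb.zip (sb.drop 1)) (PySem.List.pyGetD sb 0 0) (PySem.List.pyGetD sb (-1) 0) st p =
      pvPersonB sb sb.length (PySem.List.pyGetD sb (-1) 0) st p := by
  obtain ⟨G, y, o, pmin, pmax⟩ := st
  obtain ⟨name, age⟩ := p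
  obtain ⟨hj1, hj2, hj3⟩ := PySem.List.bisectRight_spec sb age hs
  set j := PySem.List.bisectRight sb age with hjdef
  have hzl : (sb.zip (sb.drop 1)).length = sb.length - 1 := by simp [List.length_zip]
  have hsne : sb ≠ [] := by intro h; subst h; simp at hn
  have hmin : PySem.List.pyGetD sb 0 0 = sb[0]'(by omega) := by
    rw [PySem.List.pyGetD_zero, List.getD_eq_getElem _ _ (by omega)]
  have hmax : PySem.List.pyGetD sb (-1) 0 = sb[sb.length - 1]'(by omega) := by
    rw [PySem.List.pyGetD_neg_one _ _ hsne, List.getLast_eq_getElem]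
  have h0last : sb[0]'(by omega) ≤ sb[sb.length - 1]'(by omega) := by
    rcases Nat.eq_or_lt_of_le (by omega : (0:Nat) ≤ sb.length - 1) with he | hlt
    · exact le_of_eq (by congr 1)
    · exact (List.pairwise_iff_getElem.mp hs) 0 (sb.length - 1) (by omega) (by omega) hlt
  unfold pvPersonA pvPersonB
  dsimp only
  rw [pvScanA_aux name age _ 0 G false j (pvMatch_iff sb age hs)]
  simp only [hzl, Nat.zero_add, Bool.false_or, hmin, hmax]
  by_cases hj0 : j = 0
  · have hcond : ¬ (1 ≤ j ∧ j ≤ sb.length - 1) := by omega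
    have hlt0 : age < sb[0]'(by omega) := hj3 0 (by omega) (by omega)
    have hnmax : ¬ (age > sb[sb.length - 1]'(by omega)) := by omega
    rw [if_neg hcond, decide_eq_false hcond]
    simp only [if_neg hnmax, if_pos hlt0]
    have hm2 : (if age < pmin then age else pmin) = min pmin age := by split_ifs <;> omega
    rw [hm2, ← hjdef]
    simp [hj0]
  · by_cases hjn : j = sb.length
    · have hcond : ¬ (1 ≤ j ∧ j ≤ sb.length - 1) := by omega
      have hge0 : sb[0]'(by omega) ≤ age := hj2 0 (by omega) (by omega)
      rw [if_neg hcond, decide_eq_false hcond]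
      by_cases hamax : age > sb[sb.length - 1]'(by omega)
      · rw [if_pos hamax, if_pos hamax]
        have hm2 : (if age > pmax then age else pmax) = max pmax age := by split_ifs <;> omega
        rw [hm2, ← hjdef]
        simp [hjn, hsne]
      · rw [if_neg hamax, if_neg hamax, if_neg (by omega : ¬ age < sb[0]'(by omega)), ← hjdef]
        simp [hjn, hsne]
    · have hcond : 1 ≤ j ∧ j ≤ sb.length - 1 := by omega
      rw [if_pos hcond, decide_eq_true hcond, ← hjdef]
      simp [hj0, hjn]

theorem pvMinB_eq (sb : List Int) (hn : 2 ≤ sb.length) :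
    (PySem.List.pyGetD (sb.zip (sb.drop 1)) 0 ((0 : Int), (0 : Int))).1 =
      PySem.List.pyGetD sb 0 0 := by
  have hl : (sb.zip (sb.drop 1)).length = sb.length - 1 := by simp [List.length_zip]
  rw [PySem.List.pyGetD_zero, PySem.List.pyGetD_zero]
  rw [List.getD_eq_getElem _ _ (by omega), List.getD_eq_getElem _ _ (by omega)]
  simp [List.getElem_zip]

theorem pvMaxB_eq (sb : List Int) (hn : 2 ≤ sb.length) :
    (PySem.List.pyGetD (sb.zip (sb.drop 1)) (-1) ((0 : Int), (0 : Int))).2 =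
      PySem.List.pyGetD sb (-1) 0 := by
  have hl : (sb.zip (sb.drop 1)).length = sb.length - 1 := by simp [List.length_zip]
  have hz : sb.zip (sb.drop 1) ≠ [] := by
    intro h; rw [h] at hl; simp at hl; omega
  have hsne : sb ≠ [] := by intro h; subst h; simp at hn
  rw [PySem.List.pyGetD_neg_one _ _ hz, PySem.List.pyGetD_neg_one _ _ hsne]
  rw [List.getLast_eq_getElem, List.getLast_eq_getElem]
  simp only [hl]
  rw [List.getElem_zip]
  simp only [List.getElem_drop]
  congr 1
  omega

-- ===== VERDICT (by name: the statement is the Claim_ definition above) =====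
theorem devide_people_by_buckets_spec : Claim_equal_devide_people_by_buckets := by
  intro people buckets _ hpre
  unfold Spec_devide_people_by_buckets
  unfold devide_people_by_buckets devide_people_by_buckets_alt
  have hs := PySem.List.sorted_pairwise buckets (fun x => x)
  have hn : 2 ≤ (PySem.List.sorted buckets (fun x => x)).length := by
    rw [PySem.List.length_sorted]; exact hpre.1
  simp only [pvCreate_eq_zip, pvMinB_eq _ hn, pvMaxB_eq _ hn]
  rw [List.foldl_ext _ (pvPersonB (PySem.List.sorted buckets (fun x => x))
        (PySem.List.sorted buckets (fun x => x)).length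
        (PySem.List.pyGetD (PySem.List.sorted buckets (fun x => x)) (-1) 0)) _
      (fun st p _ => pvPerson_eq _ hs hn st p)]
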